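-- pv_equiv track=rewrite | github.com/Shemseddine-Mammad/SAE105 | TP1.py | extraire_infos_description
-- ===== SOURCE A (Python) =====
-- def extraire_infos_description(description):
--     """
--     Extrait les informations du champ DESCRIPTION
--     """
--     lignes = description.split('\\n')
--     groupe = ""
--     prof = ""
--
--     for ligne in lignes:
--         if "RT1-" in ligne:
--             groupe = ligne.strip()
--         elif ligne and "Exporté" not in ligne and ligne != "\n":
--             prof = ligne.strip()
--
--     return groupe, prof
-- ===== SOURCE B (Python) =====
-- def extraire_infos_description(description):
--     lignes = description.split('\\n')
--     groupe = next((l.strip() for l in reversed(lignes) if "RT1-" in l), "")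
--     prof = next((l.strip() for l in reversed(lignes)
--                  if l and "Exporté" not in l and l != "\n" and "RT1-" not in l), "")
--     return groupe, prof
-- ===== Notes on version B (the rewrite author's own statement) =====
-- stated objective: simpler
-- what changed: Replaces the single interleaved loop carrying two mutable fields by two independent backwards searches (next over reversed lines) that each pick the last matching line, with the elif encoded as an explicit group-marker exclusion in the prof predicate.
import Mathlib
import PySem

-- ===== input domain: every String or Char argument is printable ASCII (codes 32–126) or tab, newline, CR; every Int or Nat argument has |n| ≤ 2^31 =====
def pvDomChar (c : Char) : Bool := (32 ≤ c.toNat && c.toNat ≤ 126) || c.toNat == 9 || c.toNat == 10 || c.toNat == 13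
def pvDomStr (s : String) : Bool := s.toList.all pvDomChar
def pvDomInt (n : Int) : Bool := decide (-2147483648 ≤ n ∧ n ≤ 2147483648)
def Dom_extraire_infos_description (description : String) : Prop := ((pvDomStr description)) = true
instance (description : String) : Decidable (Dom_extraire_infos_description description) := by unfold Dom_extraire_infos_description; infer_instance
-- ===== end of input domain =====

-- B replaces A's single interleaved two-field loop by two independent backwards
-- searches for the last matching line (objective: simpler). Note: A splits on the
-- two-character literal "\\n" (backslash-n), not on newline; both ports do the same.

-- ===== PORT A =====
def extraire_infos_description (description : String) : String × String :=
  let lignes := (PySem.Str.split? description "\\n").getD []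
  lignes.foldl
    (fun (st : String × String) ligne =>
      if PySem.Str.isIn "RT1-" ligne then
        (PySem.Str.strip ligne, st.2)
      else if ligne ≠ "" && !PySem.Str.isIn "Exporté" ligne && ligne ≠ "\n" then
        (st.1, PySem.Str.strip ligne)
      else st)
    ("", "")

-- ===== PORT B =====
def extraire_infos_description_alt (description : String) : String × String :=
  let lignes := (PySem.Str.split? description "\\n").getD []
  let groupe :=
    ((lignes.reverse.find? (fun l => PySem.Str.isIn "RT1-" l)).map PySem.Str.strip).getD ""
  let prof :=
    ((lignes.reverse.find? (fun l =>
        l ≠ "" && !PySem.Str.isIn "Exporté" l && l ≠ "\n" && !PySem.Str.isIn "RT1-" l)).map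
      PySem.Str.strip).getD ""
  (groupe, prof)

-- ===== PRECONDITION & SPEC =====
def Spec_extraire_infos_description (description : String) (out : String × String) : Prop := out = extraire_infos_description_alt description
instance (description : String) (out : String × String) : Decidable (Spec_extraire_infos_description description out) := by unfold Spec_extraire_infos_description; infer_instance

-- ===== CLAIM (what is proved, stated in full; the proofs are below) =====
def Claim_equal_extraire_infos_description : Prop := ∀ (description : String), Dom_extraire_infos_description description → Spec_extraire_infos_description description (extraire_infos_description description)

-- ===== LEMMAS AND PROOFS =====

/-- A's loop step, over abstract predicates `P` (group line) and `C` (prof line). -/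
def pvStep (P C : String → Bool) (st : String × String) (l : String) : String × String :=
  if P l then (PySem.Str.strip l, st.2)
  else if C l then (st.1, PySem.Str.strip l)
  else st

theorem pvFold_eq (P C : String → Bool) (ls : List String) (g p : String) :
    ls.foldl (pvStep P C) (g, p) =
      (((ls.reverse.find? P).map PySem.Str.strip).getD g,
       ((ls.reverse.find? (fun l => !P l && C l)).map PySem.Str.strip).getD p) := by
  induction ls generalizing g p with
  | nil => simp
  | cons x xs ih =>
    simp only [List.foldl_cons, List.reverse_cons, List.find?_append]
    rcases hP : xs.reverse.find? P with _ | lP <;>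
      rcases hQ : xs.reverse.find? (fun l => !P l && C l) with _ | lQ <;>
        simp only [pvStep] <;> split_ifs with h1 h2 <;>
          simp_all

theorem pvPred_eq :
    (fun l => !(PySem.Str.isIn "RT1-" l) &&
        (l ≠ "" && !PySem.Str.isIn "Exporté" l && l ≠ "\n")) =
    (fun l : String =>
        l ≠ "" && !PySem.Str.isIn "Exporté" l && l ≠ "\n" && !PySem.Str.isIn "RT1-" l) := by
  funext l
  cases PySem.Str.isIn "RT1-" l <;>
    cases hne : (decide (l ≠ "") : Bool) <;>
      cases PySem.Str.isIn "Exporté" l <;> simp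

-- ===== VERDICT (by name: the statement is the Claim_ definition above) =====
theorem extraire_infos_description_spec : Claim_equal_extraire_infos_description := by
  intro description _
  show _ = _
  unfold extraire_infos_description extraire_infos_description_alt
  rw [← pvPred_eq]
  exact pvFold_eq (fun l => PySem.Str.isIn "RT1-" l)
    (fun l => l ≠ "" && !PySem.Str.isIn "Exporté" l && l ≠ "\n")
    ((PySem.Str.split? description "\\n").getD []) "" ""
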